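-- pv_equiv track=rewrite | github.com/nuuuwan/election | src/nonview/base/Translate/update_dictionary.py | filter_phrases
-- ===== SOURCE A (Python) =====
-- def filter_phrases(lines):
--     phrases = []
--     for line in lines:
--         line = line.strip()
--         if not line:
--             continue
--         if line.startswith('0'):
--             continue
--
--         words = [word for word in line.split(' ') if not word.startswith('Translate.js')]
--         phrase = ' '.join(words)
--         phrases.append(phrase)
--     phrases = list(set(phrases))
--     phrases.sort()
--     return phrases
-- ===== SOURCE B (Python) =====
-- def filter_phrases(lines):
--     # Maintain `result` as a sorted, duplicate-free list throughout: each cleaned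
--     # phrase is located by binary search and inserted at its sorted position
--     # (skipped when already present), so no set and no final sort are needed.
--     result = []
--     for line in lines:
--         s = line.strip()
--         if not s or s.startswith('0'):
--             continue
--         phrase = ' '.join(w for w in s.split(' ') if not w.startswith('Translate.js'))
--         i, j = 0, len(result)
--         while i < j:
--             mid = (i + j) // 2
--             if result[mid] < phrase:
--                 i = mid + 1
--             else:
--                 j = mid
--         if i < len(result) and result[i] == phrase:
--             continue
--         result.insert(i, phrase)
--     return result
-- ===== Notes on version B (the rewrite author's own statement) =====
-- stated objective: alternative
-- what changed: Instead of appending every cleaned phrase to a list and finishing with list(set(...)) plus a sort, B maintains the result as a sorted duplicate-free list throughout, binary-searching each phrase's position and inserting it there (skipping it when already present), so no set and no final sort exist.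
import Mathlib
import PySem

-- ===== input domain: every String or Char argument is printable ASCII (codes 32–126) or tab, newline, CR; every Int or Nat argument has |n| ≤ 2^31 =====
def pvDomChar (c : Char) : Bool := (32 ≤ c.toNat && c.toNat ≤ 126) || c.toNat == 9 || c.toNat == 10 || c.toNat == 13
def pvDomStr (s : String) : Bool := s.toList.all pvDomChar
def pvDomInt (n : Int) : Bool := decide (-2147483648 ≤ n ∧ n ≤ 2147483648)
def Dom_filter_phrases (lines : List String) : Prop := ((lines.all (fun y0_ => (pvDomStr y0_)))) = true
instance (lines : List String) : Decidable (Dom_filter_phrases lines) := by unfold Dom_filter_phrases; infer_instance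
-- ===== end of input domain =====

-- B keeps the per-line cleaning but maintains the result as a sorted duplicate-free list,
-- binary-searching each phrase's position and inserting there, so A's set and final sort disappear.

-- ===== PORT A =====
-- ' '.join(word for word in line.split(' ') if not word.startswith('Translate.js'))  (shared line-cleaning code)
def fpClean (s : String) : String :=
  PySem.Str.join " " (((PySem.Chars.splitOn s.toList " ".toList).map String.ofList).filter
    (fun w => !(PySem.Str.startswith w "Translate.js")))

-- body of A's 'for line in lines' loop
def fpStepA (phrases : List String) (line : String) : List String :=
  let line := PySem.Str.strip line
  if line = "" then phrases
  else if PySem.Str.startswith line "0" then phrases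
  else phrases ++ [fpClean line]

def filter_phrases (lines : List String) : List String :=
  let phrases := lines.foldl fpStepA []
  PySem.List.sorted (PySem.Set.ofList phrases) (fun x => x) false

-- ===== PORT B =====
-- B's 'while i < j: mid = (i + j) // 2 …' binary-search loop; result[mid] is always in
-- range there (i ≤ mid < j ≤ len), so getD's default is never consulted
def fpFind (result : List String) (phrase : String) (i j : Nat) : Nat :=
  if i < j then
    let mid := (i + j) / 2
    if result.getD mid "" < phrase then fpFind result phrase (mid + 1) j
    else fpFind result phrase i mid
  else i
termination_by j - i
decreasing_by all_goals omega

-- 'if i < len(result) and result[i] == phrase: continue' / 'result.insert(i, phrase)'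
def fpInsert (result : List String) (phrase : String) : List String :=
  let i := fpFind result phrase 0 result.length
  if i < result.length && (result.getD i "" == phrase) then result
  else PySem.List.insert result (i : Int) phrase

-- body of B's 'for line in lines' loop
def fpStepB (result : List String) (line : String) : List String :=
  let s := PySem.Str.strip line
  if s = "" then result
  else if PySem.Str.startswith s "0" then result
  else fpInsert result (fpClean s)

def filter_phrases_alt (lines : List String) : List String :=
  lines.foldl fpStepB []

-- ===== PRECONDITION & SPEC =====
def Spec_filter_phrases (lines : List String) (out : List String) : Prop := out = filter_phrases_alt lines
instance (lines : List String) (out : List String) : Decidable (Spec_filter_phrases lines out) := by unfold Spec_filter_phrases; infer_instance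

-- ===== CLAIM (what is proved, stated in full; the proofs are below) =====
def Claim_equal_filter_phrases : Prop := ∀ (lines : List String), Dom_filter_phrases lines → Spec_filter_phrases lines (filter_phrases lines)

-- ===== LEMMAS AND PROOFS =====

-- the element a dropWhile stops at fails the predicate
lemma dropWhile_head_false {α : Type} (p : α → Bool) (l : List α) (h : α) (t : List α)
    (hd : l.dropWhile p = h :: t) : p h = false := by
  induction l with
  | nil => simp at hd
  | cons a l ih =>
    by_cases hp : p a
    · exact ih (by simpa [hp] using hd)
    · simp [hp] at hd
      simpa [hd.1] using hp

-- on a strictly sorted list, everything the dropWhile leaves fails to be < phrase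
lemma dropWhile_not_lt (result : List String) (phrase : String)
    (hs : result.Pairwise (· < ·)) :
    ∀ y ∈ result.dropWhile (fun x => decide (x < phrase)), ¬ y < phrase := by
  intro y hy
  cases hd : result.dropWhile (fun x => decide (x < phrase)) with
  | nil => rw [hd] at hy; exact absurd hy (List.not_mem_nil)
  | cons h t =>
    rw [hd] at hy
    have hh : ¬ (h < phrase) := by simpa using dropWhile_head_false _ _ _ _ hd
    have hps : (h :: t).Pairwise (· < ·) := hd ▸ hs.sublist (List.dropWhile_sublist _)
    rcases List.mem_cons.mp hy with he | hin
    · exact he ▸ hh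
    · exact fun hlt => hh ((List.rel_of_pairwise_cons hps hin).trans hlt)

lemma take_T (result : List String) (phrase : String) :
    result.take (result.takeWhile (fun x => decide (x < phrase))).length
      = result.takeWhile (fun x => decide (x < phrase)) :=
  (List.prefix_iff_eq_take.mp (List.takeWhile_prefix _)).symm

lemma drop_T (result : List String) (phrase : String) :
    result.drop (result.takeWhile (fun x => decide (x < phrase))).length
      = result.dropWhile (fun x => decide (x < phrase)) := by
  have h := List.takeWhile_append_dropWhile (p := fun x => decide (x < phrase)) (l := result)
  have h2 := List.drop_left (l₁ := result.takeWhile (fun x => decide (x < phrase)))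
    (l₂ := result.dropWhile (fun x => decide (x < phrase)))
  rw [h] at h2
  exact h2

lemma T_le (result : List String) (phrase : String) :
    (result.takeWhile (fun x => decide (x < phrase))).length ≤ result.length :=
  (List.takeWhile_sublist _).length_le

-- elements strictly below the takeWhile boundary compare < phrase
lemma getElem_lt_of_lt_T (result : List String) (phrase : String) (k : Nat)
    (hk : k < result.length)
    (hkT : k < (result.takeWhile (fun x => decide (x < phrase))).length) :
    result[k] < phrase := by
  have e : (result.takeWhile (fun x => decide (x < phrase)))[k]'hkT = result[k] :=
    (List.takeWhile_prefix _).getElem hkT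
  have h1 : result[k] ∈ result.takeWhile (fun x => decide (x < phrase)) :=
    e ▸ List.getElem_mem hkT
  simpa using List.mem_takeWhile_imp h1

-- elements at or above the boundary do not compare < phrase
lemma not_getElem_lt_of_T_le (result : List String) (phrase : String)
    (hs : result.Pairwise (· < ·)) (k : Nat) (hk : k < result.length)
    (hkT : (result.takeWhile (fun x => decide (x < phrase))).length ≤ k) :
    ¬ result[k] < phrase := by
  set T := (result.takeWhile (fun x => decide (x < phrase))).length with hT
  have hlt : k - T < (result.drop T).length := by
    rw [List.length_drop]; omega
  have h1 : result[k] ∈ result.dropWhile (fun x => decide (x < phrase)) := by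
    rw [← drop_T result phrase]
    have : (result.drop T)[k - T] = result[k] := by
      rw [List.getElem_drop]; congr 1; omega
    rw [← this]; exact List.getElem_mem _
  exact dropWhile_not_lt result phrase hs _ h1

-- the binary search lands exactly on the takeWhile boundary
lemma fpFind_eq (result : List String) (phrase : String)
    (hs : result.Pairwise (· < ·)) :
    ∀ n i j, j - i ≤ n →
      i ≤ (result.takeWhile (fun x => decide (x < phrase))).length →
      (result.takeWhile (fun x => decide (x < phrase))).length ≤ j →
      j ≤ result.length →
      fpFind result phrase i j = (result.takeWhile (fun x => decide (x < phrase))).length := by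
  intro n
  induction n with
  | zero =>
    intro i j hn hi hj hlen
    rw [fpFind]
    have : ¬ i < j := by omega
    simp only [this, if_false]
    omega
  | succ n ih =>
    intro i j hn hi hj hlen
    rw [fpFind]
    by_cases hij : i < j
    · simp only [hij, if_true]
      have hmid : (i + j) / 2 < result.length := by omega
      have hg : result.getD ((i + j) / 2) "" = result[(i + j) / 2] := List.getD_eq_getElem _ _ hmid
      by_cases hlt : result.getD ((i + j) / 2) "" < phrase
      · simp only [hlt, if_true]
        have hb : (i + j) / 2 < (result.takeWhile (fun x => decide (x < phrase))).length := by
          by_contra hc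
          exact not_getElem_lt_of_T_le result phrase hs _ hmid (by omega) (hg ▸ hlt)
        exact ih _ _ (by omega) (by omega) hj hlen
      · simp only [hlt, if_false]
        have hb : (result.takeWhile (fun x => decide (x < phrase))).length ≤ (i + j) / 2 := by
          by_contra hc
          exact hlt (hg ▸ getElem_lt_of_lt_T result phrase _ hmid (by omega))
        exact ih _ _ (by omega) hi hb (by omega)
    · simp only [hij, if_false]
      omega

lemma fpFind_zero_len (result : List String) (phrase : String)
    (hs : result.Pairwise (· < ·)) :
    fpFind result phrase 0 result.length
      = (result.takeWhile (fun x => decide (x < phrase))).length :=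
  fpFind_eq result phrase hs result.length 0 result.length (by omega) (by omega)
    (T_le result phrase) le_rfl

-- fpInsert on a strictly sorted list is the identity when the phrase is already present
lemma fpInsert_of_mem (result : List String) (phrase : String)
    (hs : result.Pairwise (· < ·)) (hm : phrase ∈ result) :
    fpInsert result phrase = result := by
  unfold fpInsert
  simp only [fpFind_zero_len result phrase hs]
  set T := (result.takeWhile (fun x => decide (x < phrase))).length with hT
  cases hd : result.dropWhile (fun x => decide (x < phrase)) with
  | nil =>
    exfalso
    rw [List.dropWhile_eq_nil_iff] at hd
    exact absurd (hd phrase hm) (by simp)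
  | cons h t =>
    have hh : ¬ (h < phrase) := by simpa using dropWhile_head_false _ _ _ _ hd
    have hps : (h :: t).Pairwise (· < ·) := hd ▸ hs.sublist (List.dropWhile_sublist _)
    have hsplit := List.takeWhile_append_dropWhile (p := fun x => decide (x < phrase)) (l := result)
    have hmem : phrase ∈ h :: t := by
      rcases (List.mem_append.mp (hsplit ▸ hm : phrase ∈ _ ++ _)) with hin | hin
      · exact absurd (by simpa using List.mem_takeWhile_imp hin) hh
      · exact hd ▸ hin
    have heq : h = phrase := by
      rcases List.mem_cons.mp hmem with he | hin
      · exact he.symm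
      · exact absurd (List.rel_of_pairwise_cons hps hin) hh
    have hlen := congrArg List.length (drop_T result phrase)
    rw [hd] at hlen
    simp only [List.length_drop, List.length_cons] at hlen
    have hTlt : T < result.length := by omega
    have hgd : result.getD T "" = phrase := by
      have e1 : result.drop T = h :: t := by rw [drop_T result phrase]; exact hd
      have h0 : (0:Nat) < (result.drop T).length := by rw [e1]; simp
      have e2 : (result.drop T)[0]'h0 = h := by simp [e1]
      have e3 : (result.drop T)[0]'h0 = result[T]'hTlt := by rw [List.getElem_drop]; simp
      rw [List.getD_eq_getElem _ _ hTlt, ← e3, e2, heq]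
    have hgd' : result[T]'hTlt = phrase := by
      rw [← List.getD_eq_getElem _ "" hTlt]; exact hgd
    simp [hTlt, hgd']

-- fpInsert on a strictly sorted list, phrase absent: a permutation of appending, still sorted
lemma fpInsert_of_not_mem (result : List String) (phrase : String)
    (hs : result.Pairwise (· < ·)) (hm : phrase ∉ result) :
    (fpInsert result phrase).Perm (result ++ [phrase]) ∧
      (fpInsert result phrase).Pairwise (· < ·) := by
  unfold fpInsert
  simp only [fpFind_zero_len result phrase hs]
  set T := (result.takeWhile (fun x => decide (x < phrase))).length with hT
  have hsplit := List.takeWhile_append_dropWhile (p := fun x => decide (x < phrase)) (l := result)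
  have hpre : ∀ x ∈ result.takeWhile (fun x => decide (x < phrase)), x < phrase := by
    intro x hx; simpa using List.mem_takeWhile_imp hx
  cases hd : result.dropWhile (fun x => decide (x < phrase)) with
  | nil =>
    rw [hd, List.append_nil] at hsplit
    have hTeq : T = result.length := by rw [hT, hsplit]
    have hcond : ¬ T < result.length := by omega
    simp only [hcond, decide_false, Bool.false_and, Bool.false_eq_true, if_false]
    rw [PySem.List.insert_natCast _ _ _ (le_of_eq hTeq), hTeq, List.take_length, List.drop_length]
    refine ⟨List.Perm.refl _, ?_⟩
    rw [List.pairwise_append]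
    exact ⟨hs, List.pairwise_singleton _ _, fun x hx y hy => by
      simp at hy; subst hy; exact hpre x (by rw [hsplit]; exact hx)⟩
  | cons h t =>
    have hh : ¬ (h < phrase) := by simpa using dropWhile_head_false _ _ _ _ hd
    have hne : h ≠ phrase := fun he => hm (by rw [← hsplit, hd]; simp [he])
    have hph : phrase < h := lt_of_le_of_ne (le_of_not_gt hh) (Ne.symm hne)
    have hlen := congrArg List.length (drop_T result phrase)
    rw [hd] at hlen
    simp only [List.length_drop, List.length_cons] at hlen
    have hTlt : T < result.length := by omega
    have e1 : result.drop T = h :: t := by rw [drop_T result phrase]; exact hd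
    have h0 : (0:Nat) < (result.drop T).length := by rw [e1]; simp
    have e2 : (result.drop T)[0]'h0 = h := by simp [e1]
    have e3 : (result.drop T)[0]'h0 = result[T]'hTlt := by rw [List.getElem_drop]; simp
    have hgd : result.getD T "" = h := by
      rw [List.getD_eq_getElem _ _ hTlt, ← e3, e2]
    simp only [hgd, beq_iff_eq, Bool.and_eq_true, decide_eq_true_eq]
    have hins : PySem.List.insert result (T : Int) phrase
        = result.takeWhile (fun x => decide (x < phrase)) ++ phrase :: h :: t := by
      rw [PySem.List.insert_natCast _ _ _ (le_of_lt hTlt), e1, hT, take_T]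
    rw [if_neg (by simp [hne])]
    rw [hins]
    constructor
    · refine (List.Perm.append_left _ (List.perm_append_singleton _ _).symm).trans ?_
      rw [← List.append_assoc]
      rw [hd] at hsplit
      rw [hsplit]
    · have hcross : ∀ x ∈ result.takeWhile (fun x => decide (x < phrase)), ∀ y ∈ h :: t, x < y := by
        have := hs
        rw [← hsplit, hd, List.pairwise_append] at this
        exact this.2.2
      have hsuf : (h :: t).Pairwise (· < ·) := hd ▸ hs.sublist (List.dropWhile_sublist _)
      rw [List.pairwise_append]
      refine ⟨hs.sublist (List.takeWhile_sublist _), ?_, ?_⟩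
      · rw [List.pairwise_cons]
        refine ⟨fun y hy => ?_, hsuf⟩
        rcases List.mem_cons.mp hy with he | hin
        · exact he ▸ hph
        · exact hph.trans (List.rel_of_pairwise_cons hsuf hin)
      · intro x hx y hy
        rcases List.mem_cons.mp hy with he | hin
        · exact he ▸ hpre x hx
        · exact hcross x hx y hin

-- loop invariant: B's accumulator stays strictly sorted and is a permutation of set(A's accumulator)
lemma fp_loop (lines : List String) (accA accB : List String)
    (h1 : accB.Pairwise (· < ·)) (h2 : accB.Perm (PySem.Set.ofList accA)) :
    (lines.foldl fpStepB accB).Pairwise (· < ·) ∧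
      (lines.foldl fpStepB accB).Perm (PySem.Set.ofList (lines.foldl fpStepA accA)) := by
  induction lines generalizing accA accB with
  | nil => exact ⟨h1, h2⟩
  | cons line rest ih =>
    simp only [List.foldl_cons]
    unfold fpStepA fpStepB
    by_cases he : PySem.Str.strip line = ""
    · simp only [he, if_true]; exact ih accA accB h1 h2
    · by_cases h0 : PySem.Str.startswith (PySem.Str.strip line) "0"
      · simp only [he, h0, if_false, if_true]; exact ih accA accB h1 h2
      · simp only [he, h0, Bool.false_eq_true, if_false]
        set p := fpClean (PySem.Str.strip line) with hp
        have hofl : PySem.Set.ofList (accA ++ [p]) = PySem.Set.add (PySem.Set.ofList accA) p := by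
          rw [PySem.Set.ofList_eq_foldl, PySem.Set.ofList_eq_foldl, List.foldl_append]
          rfl
        by_cases hmem : p ∈ accB
        · have hmem' : p ∈ PySem.Set.ofList accA := h2.mem_iff.mp hmem
          have hadd : PySem.Set.add (PySem.Set.ofList accA) p = PySem.Set.ofList accA := by
            simp [PySem.Set.add, PySem.Set.contains, hmem']
          rw [fpInsert_of_mem accB p h1 hmem]
          exact ih _ _ h1 (by rw [hofl, hadd]; exact h2)
        · have hmem' : p ∉ PySem.Set.ofList accA := fun hx => hmem (h2.mem_iff.mpr hx)
          have hadd : PySem.Set.add (PySem.Set.ofList accA) p = PySem.Set.ofList accA ++ [p] := by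
            simp [PySem.Set.add, PySem.Set.contains, hmem']
          obtain ⟨hperm, hpair⟩ := fpInsert_of_not_mem accB p h1 hmem
          exact ih _ _ hpair (by rw [hofl, hadd]; exact hperm.trans (h2.append_right _))

-- ===== VERDICT (by name: the statement is the Claim_ definition above) =====
theorem filter_phrases_spec : Claim_equal_filter_phrases := by
  intro lines _
  unfold Spec_filter_phrases filter_phrases filter_phrases_alt
  have h := fp_loop lines [] [] (by simp) (by simp [PySem.Set.ofList])
  exact PySem.List.sorted_eq_of_perm_of_pairwise_lt _ _ _ h.2 h.1
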